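-- pv_equiv track=rewrite | github.com/miliar/Code_Jam_Webscraper | solutions_python/Problem_201/2420.py | free_stalls_left_to
-- ===== SOURCE A (Python) =====
-- def free_stalls_left_to(stalls, position):
--     if position >= len(stalls) or stalls[position] is not None:
--         return 0
--     free = 0
--     for i in range(position - 1, -1, -1):
--         if stalls[i] is None:
--             free += 1
--         else:
--             break
--     return free
-- ===== SOURCE B (Python) =====
-- def free_stalls_left_to(stalls, position):
--     if position >= len(stalls) or stalls[position] is not None:
--         return 0
--     free = 0
--     for i in range(position):
--         free = free + 1 if stalls[i] is None else 0
--     return free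
-- ===== Notes on version B (the rewrite author's own statement) =====
-- stated objective: alternative
-- what changed: Replaces A's backward scan with break by a forward single pass over range(position) that accumulates a run length and resets it to 0 at every occupied stall; the guard expression is unchanged.
import Mathlib
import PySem

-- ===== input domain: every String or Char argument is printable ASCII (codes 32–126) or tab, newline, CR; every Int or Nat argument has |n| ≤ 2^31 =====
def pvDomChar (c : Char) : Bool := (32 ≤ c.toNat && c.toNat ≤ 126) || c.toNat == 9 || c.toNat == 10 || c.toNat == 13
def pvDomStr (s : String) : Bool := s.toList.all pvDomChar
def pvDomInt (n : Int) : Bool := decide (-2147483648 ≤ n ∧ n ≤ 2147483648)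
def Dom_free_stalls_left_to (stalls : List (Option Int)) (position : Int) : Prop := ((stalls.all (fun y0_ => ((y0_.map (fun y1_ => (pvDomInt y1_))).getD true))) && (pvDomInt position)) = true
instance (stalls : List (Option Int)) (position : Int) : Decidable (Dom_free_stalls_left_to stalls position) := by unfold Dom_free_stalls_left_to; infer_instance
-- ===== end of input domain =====

-- B replaces A's backward break-on-occupied scan with a forward single pass that resets a run-length counter (alternative decomposition, same cost).


-- ===== PORT A =====
-- backward loop 'for i in range(position-1, -1, -1)' with break: counts consecutive
-- None entries below index n (indices always in range here, so pyGetD is exact)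
def pvGoA (stalls : List (Option Int)) : Nat → Int
  | 0 => 0
  | n + 1 => if PySem.List.pyGetD stalls (n : Int) none = none then pvGoA stalls n + 1 else 0

def free_stalls_left_to (stalls : List (Option Int)) (position : Int) : Int :=
  if (stalls.length : Int) ≤ position then 0
  else
    match PySem.List.pyGet? stalls position with
    | none => 0            -- Python raises IndexError here; excluded by Pre_
    | some (some _) => 0   -- stalls[position] is not None
    | some none => pvGoA stalls position.toNat

-- ===== PORT B =====
def free_stalls_left_to_alt (stalls : List (Option Int)) (position : Int) : Int :=
  if (stalls.length : Int) ≤ position then 0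
  else
    match PySem.List.pyGet? stalls position with
    | none => 0            -- Python raises IndexError here; excluded by Pre_
    | some (some _) => 0
    | some none =>
      (PySem.List.pyRange 0 position 1).foldl
        (fun free i => if PySem.List.pyGetD stalls i none = none then free + 1 else 0) 0

-- ===== PRECONDITION & SPEC =====
-- A raises IndexError exactly when position < -len(stalls) (negative index out of range in the guard)
def Pre_free_stalls_left_to (stalls : List (Option Int)) (position : Int) : Prop :=
  -(stalls.length : Int) ≤ position
instance (stalls : List (Option Int)) (position : Int) : Decidable (Pre_free_stalls_left_to stalls position) := by unfold Pre_free_stalls_left_to; infer_instance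

def pvWitness_free_stalls_left_to : List (Option Int) × Int := ([none, some 3, none, none], 4)

def Spec_free_stalls_left_to (stalls : List (Option Int)) (position : Int) (out : Int) : Prop := out = free_stalls_left_to_alt stalls position
instance (stalls : List (Option Int)) (position : Int) (out : Int) : Decidable (Spec_free_stalls_left_to stalls position out) := by unfold Spec_free_stalls_left_to; infer_instance

-- ===== CLAIM (what is proved, stated in full; the proofs are below) =====
def Claim_equal_free_stalls_left_to : Prop := ∀ (stalls : List (Option Int)) (position : Int), Dom_free_stalls_left_to stalls position → Pre_free_stalls_left_to stalls position → Spec_free_stalls_left_to stalls position (free_stalls_left_to stalls position)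

-- ===== LEMMAS AND PROOFS =====

-- forward reset-fold over range(0, n) computes the same run length as the backward counter
theorem pv_fold_eq_goA (stalls : List (Option Int)) (n : Nat) :
    (PySem.List.pyRange 0 (n : Int) 1).foldl
      (fun free i => if PySem.List.pyGetD stalls i none = none then free + 1 else 0) 0
    = pvGoA stalls n := by
  induction n with
  | zero => simp [PySem.List.pyRange_one_eq_nil, pvGoA]
  | succ n ih =>
    have h : ((n : Int) + 1) = ((n + 1 : Nat) : Int) := by push_cast; ring
    rw [pvGoA, ← h, PySem.List.pyRange_one_succ_right (by exact Int.natCast_nonneg n),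
      List.foldl_append, ih]
    simp

theorem free_stalls_left_to_spec : Claim_equal_free_stalls_left_to := by
  intro stalls position _ _
  unfold Spec_free_stalls_left_to free_stalls_left_to free_stalls_left_to_alt
  split
  · rfl
  · rename_i hlt
    cases hp : PySem.List.pyGet? stalls position with
    | none => rfl
    | some cell =>
      cases cell with
      | some v => rfl
      | none =>
        have h := pv_fold_eq_goA stalls position.toNat
        by_cases h0 : 0 ≤ position
        · rw [Int.toNat_of_nonneg h0] at h
          exact h.symm
        · rw [PySem.List.pyRange_one_eq_nil (by omega)]
          have ht : position.toNat = 0 := by omega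
          simp [ht, pvGoA, List.foldl]

-- ===== VERDICT (by name: the statement is the Claim_ definition above) =====
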